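-- pv_equiv track=rewrite | github.com/tliddle1/advent-of-code | 2023/day07.py | getLargestCardGroup
-- ===== SOURCE A (Python) =====
-- def getLargestCardGroup(hand):
--     num_j = 0
--     d = {}
--     for c in hand:
--         if c == 'J':
--             num_j += 1
--         else:
--             if c in d.keys():
--                 d[c] += 1
--             else:
--                 d[c] = 1
--     max_v = 0
--     for v in d.values():
--         if v > max_v:
--             max_v = v
--     return max_v + num_j
-- ===== SOURCE B (Python) =====
-- def getLargestCardGroup(hand):
--     cards = sorted(c for c in hand if c != 'J')
--     num_j = len(hand) - len(cards)
--     best = 0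
--     run = 0
--     prev = None
--     for c in cards:
--         run = run + 1 if c == prev else 1
--         prev = c
--         if run > best:
--             best = run
--     return best + num_j
-- ===== Notes on version B (the rewrite author's own statement) =====
-- stated objective: alternative
-- what changed: Replaces the frequency dictionary and the max-over-values pass by filtering out jokers, sorting the remaining cards and scanning consecutive runs for the longest one.
import Mathlib
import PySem

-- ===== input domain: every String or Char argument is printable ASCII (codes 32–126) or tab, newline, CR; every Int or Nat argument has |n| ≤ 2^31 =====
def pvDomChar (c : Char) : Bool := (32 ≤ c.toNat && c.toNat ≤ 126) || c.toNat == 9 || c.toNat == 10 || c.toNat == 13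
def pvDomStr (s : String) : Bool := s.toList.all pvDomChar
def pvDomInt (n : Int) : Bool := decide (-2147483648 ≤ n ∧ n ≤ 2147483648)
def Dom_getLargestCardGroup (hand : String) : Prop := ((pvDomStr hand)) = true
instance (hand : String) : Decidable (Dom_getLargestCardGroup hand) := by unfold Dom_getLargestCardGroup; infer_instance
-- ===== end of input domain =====

-- B replaces A's frequency dictionary by a filter-sort-and-longest-run scan (alternative decomposition, same result).

-- ===== PORT A =====
def getLargestCardGroup (hand : String) : Int :=
  let st := hand.toList.foldl (fun (st : Int × PySem.Dict Char Int) c =>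
      if c == 'J' then (st.1 + 1, st.2)
      else if st.2.contains c then (st.1, st.2.insert c (st.2.getD c 0 + 1))
      else (st.1, st.2.insert c 1)) (0, PySem.Dict.empty)
  let max_v := (PySem.Dict.values st.2).foldl (fun m v => if v > m then v else m) 0
  max_v + st.1

-- ===== PORT B =====
-- B-side helper: the body of B's run-scanning for-loop
def pvRunStep (st : Option Char × Int × Int) (c : Char) : Option Char × Int × Int :=
  let run := if some c == st.1 then st.2.1 + 1 else 1
  let best := if run > st.2.2 then run else st.2.2
  (some c, run, best)

def getLargestCardGroup_alt (hand : String) : Int :=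
  let cards := PySem.List.sorted (hand.toList.filter (fun c => !(c == 'J'))) (fun x => x) false
  let numJ : Int := (hand.toList.length : Int) - (cards.length : Int)
  let st := cards.foldl pvRunStep (none, 0, 0)
  st.2.2 + numJ

-- ===== PRECONDITION & SPEC =====
def Spec_getLargestCardGroup (hand : String) (out : Int) : Prop := out = getLargestCardGroup_alt hand
instance (hand : String) (out : Int) : Decidable (Spec_getLargestCardGroup hand out) := by unfold Spec_getLargestCardGroup; infer_instance

-- ===== CLAIM (what is proved, stated in full; the proofs are below) =====
def Claim_equal_getLargestCardGroup : Prop := ∀ (hand : String), Dom_getLargestCardGroup hand → Spec_getLargestCardGroup hand (getLargestCardGroup hand)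

-- ===== LEMMAS AND PROOFS =====

-- foldl max bounds
lemma pvFoldlMax_init_le (xs : List Int) (b : Int) : b ≤ xs.foldl max b := by
  induction xs generalizing b with
  | nil => simp
  | cons x t ih => simpa using le_trans (Int.le_max_left b x) (ih (max b x))

lemma pvFoldlMax_mem_le (xs : List Int) (b x : Int) (hx : x ∈ xs) : x ≤ xs.foldl max b := by
  induction xs generalizing b with
  | nil => simp at hx
  | cons a t ih =>
    rcases List.mem_cons.mp hx with rfl | h
    · simpa using le_trans (Int.le_max_right b x) (pvFoldlMax_init_le t (max b x))
    · simpa using ih (max b a) h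

lemma pvFoldlMax_cases (xs : List Int) (b : Int) : xs.foldl max b = b ∨ xs.foldl max b ∈ xs := by
  induction xs generalizing b with
  | nil => left; rfl
  | cons a t ih =>
    rcases ih (max b a) with h | h
    · rcases le_total b a with hba | hab
      · right; rw [List.foldl_cons, h, max_eq_right hba]; simp
      · left; rw [List.foldl_cons, h, max_eq_left hab]
    · right; simp [h]

-- largest multiplicity of any element of l
def pvMaxCnt (l : List Char) : Int := (l.map (fun k => (l.count k : Int))).foldl max 0

lemma pvMaxCnt_nonneg (l : List Char) : 0 ≤ pvMaxCnt l := pvFoldlMax_init_le _ 0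

lemma pvLe_maxCnt (l : List Char) (k : Char) (hk : k ∈ l) : (l.count k : Int) ≤ pvMaxCnt l :=
  pvFoldlMax_mem_le _ 0 _ (List.mem_map.mpr ⟨k, hk, rfl⟩)

lemma pvMaxCnt_le (l : List Char) (x : Int) (h0 : 0 ≤ x)
    (hc : ∀ k ∈ l, (l.count k : Int) ≤ x) : pvMaxCnt l ≤ x := by
  rcases pvFoldlMax_cases (l.map (fun k => (l.count k : Int))) 0 with h | h
  · unfold pvMaxCnt; rw [h]; exact h0
  · obtain ⟨k, hk, he⟩ := List.mem_map.mp h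
    unfold pvMaxCnt
    rw [← he]
    exact hc k hk

lemma pvMaxCnt_cases (l : List Char) :
    pvMaxCnt l = 0 ∨ ∃ k ∈ l, pvMaxCnt l = (l.count k : Int) := by
  rcases pvFoldlMax_cases (l.map (fun k => (l.count k : Int))) 0 with h | h
  · left; exact h
  · obtain ⟨k, hk, he⟩ := List.mem_map.mp h
    right; exact ⟨k, hk, he.symm⟩

lemma pvMaxCnt_perm {l₁ l₂ : List Char} (h : l₁.Perm l₂) : pvMaxCnt l₁ = pvMaxCnt l₂ := by
  have hle : ∀ {a b : List Char}, a.Perm b → pvMaxCnt a ≤ pvMaxCnt b := by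
    intro a b hab
    rcases pvMaxCnt_cases a with h0 | ⟨k, hk, he⟩
    · rw [h0]; exact pvMaxCnt_nonneg b
    · rw [he, hab.count_eq]
      exact pvLe_maxCnt b k (hab.mem_iff.mp hk)
  exact le_antisymm (hle h) (hle h.symm)

lemma pvCount_filter_ne (t : List Char) (k c : Char) (h : k ≠ c) :
    (t.filter (fun x => !(x == c))).count k = t.count k :=
  List.count_filter (by simp [h])

lemma pvMaxCnt_cons (c : Char) (t : List Char) :
    pvMaxCnt (c :: t) = max (1 + (t.count c : Int)) (pvMaxCnt (t.filter (fun x => !(x == c)))) := by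
  apply le_antisymm
  · apply pvMaxCnt_le
    · exact le_trans (by positivity) (Int.le_max_left (1 + (t.count c : Int)) _)
    · intro k hk
      by_cases h : k = c
      · subst h
        have : (k :: t).count k = t.count k + 1 := by simp
        rw [this]
        refine le_trans (le_of_eq ?_) (Int.le_max_left _ _)
        push_cast; ring
      · have hkt : k ∈ t := by rcases List.mem_cons.mp hk with h' | h'; exact absurd h' h; exact h'
        have h1 : (c :: t).count k = t.count k := by
          simp [List.count_cons]
          exact fun hck => h hck.symm
        rw [h1, ← pvCount_filter_ne t k c h]
        refine le_trans (pvLe_maxCnt _ k ?_) (Int.le_max_right _ _)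
        simp [List.mem_filter, hkt, h]
  · apply max_le
    · have : (1 : Int) + (t.count c : Int) = ((c :: t).count c : Int) := by simp; push_cast; ring
      rw [this]
      exact pvLe_maxCnt _ c (by simp)
    · apply pvMaxCnt_le
      · exact pvMaxCnt_nonneg _
      · intro k hk
        have hkc : k ≠ c := by have := (List.mem_filter.mp hk).2; simpa using this
        have hkt : k ∈ t := (List.mem_filter.mp hk).1
        rw [pvCount_filter_ne t k c hkc]
        have h1 : (c :: t).count k = t.count k := by
          simp [List.count_cons]
          exact fun hck => hkc hck.symm
        rw [← h1]
        exact pvLe_maxCnt _ k (by simp [hkt])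

lemma pvMaxCnt_nil : pvMaxCnt [] = 0 := rfl

-- step evaluations for B's run loop
lemma pvRunStep_reset (p : Option Char) (r b : Int) (c : Char) (hne : (some c == p) = false) :
    pvRunStep (p, r, b) c = (some c, 1, max b 1) := by
  simp only [pvRunStep, hne, Bool.false_eq_true, if_false]
  have : (if (1 : Int) > b then 1 else b) = max b 1 := by rw [Int.max_def]; split_ifs <;> omega
  rw [this]

lemma pvRunStep_same (c : Char) (r b : Int) :
    pvRunStep (some c, r, b) c = (some c, r + 1, max b (r + 1)) := by
  simp only [pvRunStep, beq_self_eq_true, if_true]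
  have : (if r + 1 > b then r + 1 else b) = max b (r + 1) := by rw [Int.max_def]; split_ifs <;> omega
  rw [this]

-- run fold over n copies of the current character
lemma pvRunReplicate (n : Nat) (c : Char) (r b : Int) (hr : 0 ≤ r) (hrb : r ≤ b) :
    (List.replicate n c).foldl pvRunStep (some c, r, b) = (some c, r + n, max b (r + n)) := by
  induction n generalizing r b with
  | zero => simp [max_eq_left hrb]
  | succ n ih =>
    rw [List.replicate_succ, List.foldl_cons, pvRunStep_same]
    rw [ih (r + 1) (max b (r + 1)) (by omega) (Int.le_max_right b (r + 1))]
    have h1 : max (max b (r + 1)) (r + 1 + (n : Int)) = max b (r + ((n + 1 : Nat) : Int)) := by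
      rw [Int.max_def, Int.max_def, Int.max_def]; split_ifs <;> push_cast <;> omega
    have h2 : r + 1 + (n : Int) = r + ((n + 1 : Nat) : Int) := by push_cast; ring
    rw [h1, h2]

-- sorted decomposition: in a sorted list all copies of the head's value come first
lemma pvSortedSplit (c : Char) (t : List Char) (hp : t.Pairwise (· ≤ ·)) (hge : ∀ x ∈ t, c ≤ x) :
    t = List.replicate (t.count c) c ++ t.filter (fun x => !(x == c)) := by
  induction t with
  | nil => simp
  | cons a t₂ ih =>
    have hp₂ : t₂.Pairwise (· ≤ ·) := hp.of_cons
    have hat₂ : ∀ x ∈ t₂, a ≤ x := fun x hx => (List.pairwise_cons.mp hp).1 x hx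
    by_cases h : a = c
    · subst h
      have hc : (a :: t₂).count a = t₂.count a + 1 := by simp
      rw [hc, List.replicate_succ, List.filter_cons]
      simp only [beq_self_eq_true, Bool.not_true, if_false]
      exact congrArg (a :: ·) (ih hp₂ (fun x hx => hat₂ x hx))
    · have hca : c < a := lt_of_le_of_ne (hge a (by simp)) (fun he => h he.symm)
      have hnot : ∀ x ∈ a :: t₂, x ≠ c := by
        intro x hx
        rcases List.mem_cons.mp hx with rfl | hx
        · exact h
        · exact fun he => absurd (lt_of_lt_of_le hca (hat₂ x hx)) (by rw [he]; exact lt_irrefl c)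
      have hcnt : (a :: t₂).count c = 0 := by
        rw [List.count_eq_zero]
        intro hc; exact hnot c hc rfl
      have hfil : (a :: t₂).filter (fun x => !(x == c)) = a :: t₂ := by
        rw [List.filter_eq_self]
        intro x hx; simp [hnot x hx]
      rw [hcnt, hfil]; rfl

-- main run lemma: on a sorted list whose elements all differ from prev, best becomes max b (pvMaxCnt s)
lemma pvRunFold (n : Nat) : ∀ (s : List Char), s.length ≤ n → s.Pairwise (· ≤ ·) →
    ∀ (p : Option Char) (r b : Int), (∀ c ∈ s, p ≠ some c) → 0 ≤ r → r ≤ b →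
    (s.foldl pvRunStep (p, r, b)).2.2 = max b (pvMaxCnt s) := by
  induction n with
  | zero =>
    intro s hs _ p r b _ hr hrb
    have : s = [] := List.length_eq_zero_iff.mp (Nat.le_zero.mp hs)
    subst this
    show b = max b (pvMaxCnt [])
    rw [pvMaxCnt_nil, max_eq_left (le_trans hr hrb)]
  | succ n ih =>
    intro s hs hsort p r b hp hr hrb
    cases s with
    | nil =>
        show b = max b (pvMaxCnt [])
        rw [pvMaxCnt_nil, max_eq_left (le_trans hr hrb)]
    | cons c t =>
      have hne : (some c == p) = false := by
        cases p with
        | none => rfl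
        | some q =>
          rw [beq_eq_false_iff_ne]
          exact fun he => (hp c (by simp)) he.symm
      rw [List.foldl_cons, pvRunStep_reset p r b c hne]
      have hp₂ : t.Pairwise (· ≤ ·) := hsort.of_cons
      have hge : ∀ x ∈ t, c ≤ x := fun x hx => (List.pairwise_cons.mp hsort).1 x hx
      conv_lhs => rw [pvSortedSplit c t hp₂ hge]
      rw [List.foldl_append,
          pvRunReplicate (t.count c) c 1 (max b 1) (by omega) (Int.le_max_right b 1)]
      set t' := t.filter (fun x => !(x == c)) with ht'
      have hmax1 : max (max b 1) (1 + (t.count c : Int)) = max b (1 + (t.count c : Int)) := by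
        rw [Int.max_def, Int.max_def, Int.max_def]
        split_ifs <;> push_cast <;> omega
      rw [hmax1]
      have hlen : t'.length ≤ n := by
        have h1 : t'.length ≤ t.length := List.length_filter_le _ _
        have h2 : t.length + 1 ≤ n + 1 := by simpa using hs
        omega
      have hsort' : t'.Pairwise (· ≤ ·) := hp₂.filter _
      have hp' : ∀ x ∈ t', (some c : Option Char) ≠ some x := by
        intro x hx he
        have := (List.mem_filter.mp hx).2
        simp at this
        exact this (by injection he with h; exact h.symm)
      rw [ih t' hlen hsort' (some c) (1 + (t.count c : Int)) (max b (1 + (t.count c : Int)))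
          hp' (by positivity) (Int.le_max_right _ _)]
      rw [pvMaxCnt_cons c t, ← ht']
      rw [Int.max_def, Int.max_def, Int.max_def, Int.max_def]
      split_ifs <;> omega

-- A-side: the dict loop splits into the 'J' count and a counter loop over the other cards
lemma pvFoldA (l : List Char) (j : Int) (d : PySem.Dict Char Int) :
    l.foldl (fun (st : Int × PySem.Dict Char Int) c =>
      if c == 'J' then (st.1 + 1, st.2)
      else if st.2.contains c then (st.1, st.2.insert c (st.2.getD c 0 + 1))
      else (st.1, st.2.insert c 1)) (j, d)
    = (j + (l.count 'J' : Int),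
       (l.filter (fun c => !(c == 'J'))).foldl
         (fun d c => if d.contains c then d.insert c (d.getD c 0 + 1) else d.insert c 1) d) := by
  induction l generalizing j d with
  | nil => simp
  | cons c t ih =>
    by_cases h : c = 'J'
    · subst h
      simp only [List.foldl_cons, beq_self_eq_true, if_true, List.filter_cons, Bool.not_true,
        if_false]
      rw [ih]
      have : (('J' :: t).count 'J' : Int) = (t.count 'J' : Int) + 1 := by simp
      rw [this]
      congr 1
      ring
    · have hb : (c == 'J') = false := by simp [h]
      simp only [List.foldl_cons, List.filter_cons, hb, Bool.false_eq_true, if_false,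
        Bool.not_false, if_true]
      have hcnt : ((c :: t).count 'J' : Int) = (t.count 'J' : Int) := by
        simp [List.count_cons, h]
      by_cases hc : PySem.Dict.contains d c = true
      · rw [if_pos hc, ih, hcnt, if_pos hc]
      · rw [if_neg hc, ih, hcnt, if_neg hc]

lemma pvStepC_eq :
    (fun (d : PySem.Dict Char Int) c => if d.contains c then d.insert c (d.getD c 0 + 1) else d.insert c 1)
    = (fun (d : PySem.Dict Char Int) c => d.insert c (d.getD c 0 + 1)) := by
  funext d c
  by_cases h : d.contains c = true
  · rw [if_pos h]
  · rw [if_neg h]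
    have hb : d.contains c = false := by simpa using h
    have h0 : d.getD c 0 = 0 := by
      have hiso := PySem.Dict.contains_eq_isSome_get? (d := d) (k := c)
      rw [hb] at hiso
      have hn : d.get? c = none := by
        cases hg : d.get? c with
        | none => rfl
        | some v => rw [hg] at hiso; simp at hiso
      simp [PySem.Dict.getD, hn]
    rw [h0]
    norm_num

-- num_j as a length difference
lemma pvCountJ (l : List Char) :
    (l.count 'J' : Int) + ((l.filter (fun c => !(c == 'J'))).length : Int) = (l.length : Int) := by
  induction l with
  | nil => simp
  | cons c t ih =>
    by_cases h : c = 'J'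
    · subst h; simp only [List.count_cons, List.filter_cons, beq_self_eq_true, Bool.not_true,
        if_false, if_true, List.length_cons]
      push_cast at ih ⊢; omega
    · have hb : (c == 'J') = false := by simp [h]
      simp only [List.count_cons, List.filter_cons, hb, Bool.not_false, if_true,
        Bool.false_eq_true, if_false, List.length_cons]
      push_cast at ih ⊢; omega

-- A's max over the counter's values equals pvMaxCnt
lemma pvMaxValues (l : List Char) :
    ((PySem.Dict.counter l).values).foldl (fun m v => if v > m then v else m) 0 = pvMaxCnt l := by
  have hstep : (fun (m v : Int) => if v > m then v else m) = (fun m v => max m v) := by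
    funext m v
    rw [Int.max_def]
    split_ifs <;> omega
  rw [hstep]
  have hv : (PySem.Dict.counter l).values = (PySem.Set.ofList l).map (fun k => (l.count k : Int)) := by
    show ((PySem.Dict.counter l).items).map (·.2) = _
    rw [PySem.Dict.items_counter]
    simp
  rw [hv]
  apply le_antisymm
  · rcases pvFoldlMax_cases ((PySem.Set.ofList l).map (fun k => (l.count k : Int))) 0 with h | h
    · rw [h]; exact pvMaxCnt_nonneg l
    · obtain ⟨k, hk, he⟩ := List.mem_map.mp h
      rw [← he]
      exact pvLe_maxCnt l k ((PySem.Set.mem_ofList l k).mp hk)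
  · rcases pvMaxCnt_cases l with h | ⟨k, hk, he⟩
    · rw [h]; exact pvFoldlMax_init_le _ 0
    · rw [he]
      exact pvFoldlMax_mem_le _ 0 _ (List.mem_map.mpr ⟨k, (PySem.Set.mem_ofList l k).mpr hk, rfl⟩)

-- ===== VERDICT (by name: the statement is the Claim_ definition above) =====
theorem getLargestCardGroup_spec : Claim_equal_getLargestCardGroup := by
  intro hand _
  unfold Spec_getLargestCardGroup
  simp only [getLargestCardGroup, getLargestCardGroup_alt]
  set l := hand.toList with hl
  set nonJ := l.filter (fun c => !(c == 'J')) with hnonJ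
  rw [pvFoldA l 0 PySem.Dict.empty, pvStepC_eq, PySem.Dict.foldl_insert_getD_add_one_eq_counter]
  simp only [pvMaxValues]
  set cards := PySem.List.sorted nonJ (fun x => x) false with hcards
  have hperm : cards.Perm nonJ := PySem.List.sorted_perm nonJ (fun x => x) false
  have hsort : cards.Pairwise (· ≤ ·) := by
    have := PySem.List.sorted_pairwise (xs := nonJ) (key := fun x => x)
    simpa using this
  have hrun : (cards.foldl pvRunStep ((none : Option Char), (0 : Int), (0 : Int))).2.2
      = max 0 (pvMaxCnt cards) :=
    pvRunFold cards.length cards (le_refl _) hsort none 0 0 (by simp) (le_refl _) (le_refl _)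
  rw [hrun, max_eq_right (pvMaxCnt_nonneg cards), pvMaxCnt_perm hperm]
  have hlen : cards.length = nonJ.length := hperm.length_eq
  have hJ := pvCountJ l
  rw [← hnonJ] at hJ
  have hcnt : (l.count 'J' : Int) = (l.length : Int) - (nonJ.length : Int) := by omega
  rw [hlen, hcnt]
  ring
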